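-- pv_equiv track=rewrite | github.com/albl2008/algoritmos2 | practicas/tp-grafos/code/grafo.py | convertToDFSTree
-- ===== SOURCE A (Python) =====
-- def convertToDFSTree(Grafo,v):
--   DFS_Tree = {v:[]}
--   visited = set()
--   DFS(Grafo,v,v,DFS_Tree,visited)
--   for vertex in Grafo:
--     if vertex not in visited:
--       DFS_Tree[vertex]=[]
--       DFS(Grafo,vertex,vertex,DFS_Tree,visited)
--   return DFS_Tree
--
-- def DFS(Grafo,v,root,DFS_Tree,visited):
--   visited.add(v)
--   for adj_vertex in Grafo[v]:
--     if adj_vertex not in visited: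
--       DFS_Tree[root].append(adj_vertex)
--       DFS_Tree[adj_vertex]=[]
--       DFS(Grafo,adj_vertex,root,DFS_Tree,visited)
-- ===== SOURCE B (Python) =====
-- def convertToDFSTree(Grafo, v):
--     DFS_Tree = {}
--     visited = set()
--     for start in [v, *Grafo]:
--         if start not in visited:
--             visited.add(start)
--             DFS_Tree[start] = []
--             stack = [iter(Grafo[start])]
--             while stack:
--                 adj = next((a for a in stack[-1] if a not in visited), None)
--                 if adj is None:
--                     stack.pop()
--                 else:
--                     visited.add(adj)
--                     DFS_Tree[start].append(adj)
--                     DFS_Tree[adj] = []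
--                     stack.append(iter(Grafo[adj]))
--     return DFS_Tree
-- ===== Notes on version B (the rewrite author's own statement) =====
-- stated objective: alternative
-- what changed: Replaces the recursive DFS helper (call stack, mutable dict threaded through recursion) with a single iterative loop over an explicit stack of per-vertex neighbor cursors, handling the first vertex and the remaining components uniformly; same preorder tree, no recursion.
import Mathlib
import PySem

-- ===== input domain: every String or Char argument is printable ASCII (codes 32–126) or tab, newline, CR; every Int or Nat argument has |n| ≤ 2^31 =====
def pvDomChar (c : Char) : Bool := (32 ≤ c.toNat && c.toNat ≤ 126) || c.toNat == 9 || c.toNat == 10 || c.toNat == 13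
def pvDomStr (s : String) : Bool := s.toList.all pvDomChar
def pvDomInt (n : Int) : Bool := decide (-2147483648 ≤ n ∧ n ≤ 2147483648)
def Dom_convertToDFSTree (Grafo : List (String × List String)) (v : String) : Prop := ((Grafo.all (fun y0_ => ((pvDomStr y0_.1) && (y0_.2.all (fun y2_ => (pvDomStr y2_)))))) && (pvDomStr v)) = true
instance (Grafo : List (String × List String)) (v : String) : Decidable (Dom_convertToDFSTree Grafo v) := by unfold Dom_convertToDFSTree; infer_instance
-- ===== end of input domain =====

-- B replaces the recursive DFS helper by one iterative loop over an explicit stack of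
-- neighbor cursors (same preorder tree, no recursion); equivalence is proved on Pre_.

-- ===== PORT A =====
-- `Grafo[x]` on the Python dict (getD: Python raises KeyError when x is absent — such inputs are excluded by Pre_)
def pvNbrs (Grafo : List (String × List String)) (x : String) : List String :=
  (PySem.Dict.mk Grafo).getD x []

-- the finite universe of vertex names occurring in Grafo: used ONLY as a termination
-- measure / descend guard (every vertex the Python run descends into lies in it)
def pvUniv (Grafo : List (String × List String)) : List String :=
  Grafo.map Prod.fst ++ (Grafo.map Prod.snd).flatten

-- number of universe vertices not yet visited (the termination measure's first component)
def pvUnvis (U : List String) (vis : PySem.Set String) : Nat :=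
  U.countP (fun x => decide (x ∉ vis))

lemma pvUnvis_add_le (U : List String) (vis : PySem.Set String) (a : String) :
    pvUnvis U (PySem.Set.add vis a) ≤ pvUnvis U vis := by
  refine List.countP_mono_left (fun x _ h => ?_)
  simp only [decide_eq_true_eq] at *
  exact fun hx => h ((PySem.Set.mem_add vis a x).2 (Or.inl hx))

lemma pvUnvis_add_lt (U : List String) (vis : PySem.Set String) (a : String)
    (hU : a ∈ U) (ha : a ∉ vis) :
    pvUnvis U (PySem.Set.add vis a) < pvUnvis U vis := by
  obtain ⟨s, t, rfl⟩ := List.append_of_mem hU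
  unfold pvUnvis
  rw [List.countP_append, List.countP_append, List.countP_cons, List.countP_cons]
  have h1 : decide (a ∉ PySem.Set.add vis a) = false := by
    simp [(PySem.Set.mem_add vis a a).2 (Or.inr rfl)]
  have h2 : decide (a ∉ vis) = true := by simp [ha]
  rw [h1, h2]
  have := pvUnvis_add_le s vis a
  have := pvUnvis_add_le t vis a
  unfold pvUnvis at *
  simp only [Bool.false_eq_true, if_false, if_true]
  omega

lemma pvUnvis_le_of_subset (U : List String) (s t : PySem.Set String)
    (h : ∀ x ∈ s, x ∈ t) : pvUnvis U t ≤ pvUnvis U s := by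
  refine List.countP_mono_left (fun x _ hx => ?_)
  simp only [decide_eq_true_eq] at *
  exact fun hxs => hx (h x hxs)

lemma pvSubset_update' (s xs : PySem.Set String) : ∀ x ∈ xs, x ∈ PySem.Set.update s xs := by
  intro x hx; exact (PySem.Set.mem_update s xs x).2 (Or.inr hx)

-- literal transliteration of the recursive helper DFS(Grafo, -, root, DFS_Tree, visited):
-- processes the remaining neighbor list `adjs` of the current call frame; the dite on
-- `adj ∈ U` and the `Set.update` on the backed-up visited set are termination guards only —
-- on every state the entry point reaches, `adj ∈ U` holds and the update is a no-op.
def dfsA (Grafo : List (String × List String)) (U : List String) (root : String)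
    (adjs : List String) (tree : PySem.Dict String (List String)) (vis : PySem.Set String) :
    PySem.Dict String (List String) × PySem.Set String :=
  match adjs with
  | [] => (tree, vis)
  | adj :: rest =>
    if hv : adj ∈ vis then
      dfsA Grafo U root rest tree vis
    else
      -- DFS_Tree[root].append(adj); DFS_Tree[adj] = []; recursive DFS adds adj to visited first
      let tree1 := (PySem.Dict.modify tree root [] (· ++ [adj])).insert adj []
      let vis1 := PySem.Set.add vis adj
      if hU : adj ∈ U then
        let r := dfsA Grafo U root (pvNbrs Grafo adj) tree1 vis1
        dfsA Grafo U root rest r.1 (PySem.Set.update r.2 vis1)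
      else
        dfsA Grafo U root rest tree1 vis1
termination_by (pvUnvis U vis, adjs.length)
decreasing_by
  · exact Prod.Lex.right _ (Nat.lt_succ_self _)
  · exact Prod.Lex.left _ _ (pvUnvis_add_lt U vis adj hU hv)
  · exact Prod.Lex.left _ _
      (Nat.lt_of_le_of_lt
        (pvUnvis_le_of_subset U (PySem.Set.add vis adj) _ (pvSubset_update' _ _))
        (pvUnvis_add_lt U vis adj hU hv))
  · exact Prod.Lex.right' _ (pvUnvis_add_le U vis adj) (Nat.lt_succ_self _)

def convertToDFSTree (Grafo : List (String × List String)) (v : String) : List (String × List String) :=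
  let U := pvUniv Grafo
  -- DFS_Tree = {v: []}; DFS(Grafo, v, v, DFS_Tree, visited) first marks v visited
  let s1 := dfsA Grafo U v (pvNbrs Grafo v)
      (PySem.Dict.insert PySem.Dict.empty v []) (PySem.Set.add PySem.Set.empty v)
  -- for vertex in Grafo: if vertex not in visited: DFS_Tree[vertex] = []; DFS(...)
  let final := (PySem.Dict.mk Grafo).keys.foldl (fun st k =>
      if k ∈ st.2 then st
      else
        let tree1 := st.1.insert k []
        let vis1 := PySem.Set.add st.2 k
        dfsA Grafo U k (pvNbrs Grafo k) tree1 vis1) s1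
  final.1.items

-- ===== PORT B =====
-- the iterative DFS loop of Source B: `stack` holds, per frame, the not-yet-consumed part of a
-- vertex's neighbor iterator; the dite on `adj ∈ U` is a termination guard only (it always
-- holds on reachable states, where every pushed neighbor occurs in Grafo's lists)
def runB (Grafo : List (String × List String)) (U : List String) (start : String)
    (stack : List (List String)) (tree : PySem.Dict String (List String)) (vis : PySem.Set String) :
    PySem.Dict String (List String) × PySem.Set String :=
  match stack with
  | [] => (tree, vis)
  | [] :: stk => runB Grafo U start stk tree vis                 -- iterator exhausted: pop
  | (adj :: restTop) :: stk =>
    if hv : adj ∈ vis then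
      runB Grafo U start (restTop :: stk) tree vis               -- advance the top iterator
    else
      let vis1 := PySem.Set.add vis adj
      let tree1 := (PySem.Dict.modify tree start [] (· ++ [adj])).insert adj []
      if hU : adj ∈ U then
        runB Grafo U start (pvNbrs Grafo adj :: restTop :: stk) tree1 vis1   -- push iter(Grafo[adj])
      else
        runB Grafo U start (restTop :: stk) tree1 vis1
termination_by (pvUnvis U vis, (stack.map List.length).sum + stack.length)
decreasing_by
  · exact Prod.Lex.right _ (by simp only [List.map_cons, List.sum_cons, List.length_cons]; omega)
  · exact Prod.Lex.right _ (by simp only [List.map_cons, List.sum_cons, List.length_cons]; omega)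
  · exact Prod.Lex.left _ _ (pvUnvis_add_lt U vis adj hU hv)
  · exact Prod.Lex.right' _ (pvUnvis_add_le U vis adj) (by simp only [List.map_cons, List.sum_cons, List.length_cons]; omega)

def convertToDFSTree_alt (Grafo : List (String × List String)) (v : String) : List (String × List String) :=
  let U := pvUniv Grafo
  -- for start in [v, *Grafo]: if start not in visited: visited.add(start); DFS_Tree[start]=[]; run the stack loop
  let final := (v :: (PySem.Dict.mk Grafo).keys).foldl (fun st start =>
      if start ∈ st.2 then st
      else
        let vis1 := PySem.Set.add st.2 start
        let tree1 := st.1.insert start []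
        runB Grafo U start [pvNbrs Grafo start] tree1 vis1)
    (PySem.Dict.empty, PySem.Set.empty)
  final.1.items

-- ===== PRECONDITION & SPEC =====
-- Pre_ excludes (a) inputs where v or some listed neighbor is not a key of Grafo — there the
-- Python A raises KeyError — and (b) association lists with duplicate keys, which cannot arise
-- from a Python dict (no Python input maps to such a list; representation invariant of the dict argument).
def Pre_convertToDFSTree (Grafo : List (String × List String)) (v : String) : Prop :=
  v ∈ Grafo.map Prod.fst ∧
  (∀ p ∈ Grafo, ∀ a ∈ p.2, a ∈ Grafo.map Prod.fst) ∧
  (Grafo.map Prod.fst).Nodup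
instance (Grafo : List (String × List String)) (v : String) : Decidable (Pre_convertToDFSTree Grafo v) := by unfold Pre_convertToDFSTree; infer_instance

def pvWitness_convertToDFSTree : (List (String × List String)) × String :=
  ([("a", ["b", "c"]), ("b", []), ("c", ["a"]), ("d", ["c"])], "a")

def Spec_convertToDFSTree (Grafo : List (String × List String)) (v : String) (out : List (String × List String)) : Prop := out = convertToDFSTree_alt Grafo v
instance (Grafo : List (String × List String)) (v : String) (out : List (String × List String)) : Decidable (Spec_convertToDFSTree Grafo v out) := by unfold Spec_convertToDFSTree; infer_instance

-- ===== CLAIM (what is proved, stated in full; the proofs are below) =====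
def Claim_equal_convertToDFSTree : Prop := ∀ (Grafo : List (String × List String)) (v : String), Dom_convertToDFSTree Grafo v → Pre_convertToDFSTree Grafo v → Spec_convertToDFSTree Grafo v (convertToDFSTree Grafo v)

-- ===== LEMMAS AND PROOFS =====

-- visited only grows through a DFS call
lemma dfsA_vis_mono (Grafo : List (String × List String)) (U : List String) (root : String)
    (adjs : List String) (tree : PySem.Dict String (List String)) (vis : PySem.Set String) :
    ∀ x ∈ vis, x ∈ (dfsA Grafo U root adjs tree vis).2 := by
  fun_induction dfsA Grafo U root adjs tree vis with
  | case1 tree vis => exact fun x hx => hx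
  | case2 tree vis adj rest hv ih1 => exact ih1
  | case3 tree vis adj rest hv tree1 vis1 hU r ih3 ih2 ih1 =>
    intro x hx
    exact ih1 x ((PySem.Set.mem_update r.2 vis1 x).2
      (Or.inl (ih3 x ((PySem.Set.mem_add vis adj x).2 (Or.inl hx)))))
  | case4 tree vis adj rest hv tree1 vis1 hU ih1 =>
    intro x hx
    exact ih1 x ((PySem.Set.mem_add vis adj x).2 (Or.inl hx))

-- the update termination guard is a no-op (vis1 ⊆ result of the inner call)
lemma pvUpdate_eq_of_subset (s xs : PySem.Set String) (h : ∀ x ∈ xs, x ∈ s) :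
    PySem.Set.update s xs = s := by
  induction xs generalizing s with
  | nil => rfl
  | cons x xs ih =>
    rw [PySem.Set.update_cons, PySem.Set.add_of_mem (h x (List.mem_cons_self ..))]
    exact ih s (fun y hy => h y (List.mem_cons_of_mem _ hy))

-- the simulation: running the machine with a frame `adjs` on top equals running the recursive
-- DFS on `adjs` first and the rest of the stack afterwards
lemma runB_sim (Grafo : List (String × List String)) (U : List String) (root : String)
    (adjs : List String) (tree : PySem.Dict String (List String)) (vis : PySem.Set String) :
    ∀ stk : List (List String),
      runB Grafo U root (adjs :: stk) tree vis =
        runB Grafo U root stk (dfsA Grafo U root adjs tree vis).1 (dfsA Grafo U root adjs tree vis).2 := by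
  fun_induction dfsA Grafo U root adjs tree vis with
  | case1 tree vis =>
    intro stk; rw [runB]
  | case2 tree vis adj rest hv ih1 =>
    intro stk
    rw [runB, dif_pos hv]
    exact ih1 stk
  | case3 tree vis adj rest hv tree1 vis1 hU r ih3 ih2 ih1 =>
    intro stk
    rw [runB, dif_neg hv, dif_pos hU]
    have hupd : PySem.Set.update r.2 vis1 = r.2 :=
      pvUpdate_eq_of_subset r.2 vis1 (dfsA_vis_mono Grafo U root (pvNbrs Grafo adj) tree1 vis1)
    have h1 := ih1 stk
    rw [hupd] at h1
    rw [ih3 (rest :: stk), hupd]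
    exact h1
  | case4 tree vis adj rest hv tree1 vis1 hU ih1 =>
    intro stk
    rw [runB, dif_neg hv, dif_neg hU]
    exact ih1 stk

-- with an empty remaining stack the machine run IS one DFS call
lemma runB_single (Grafo : List (String × List String)) (U : List String) (root : String)
    (adjs : List String) (tree : PySem.Dict String (List String)) (vis : PySem.Set String) :
    runB Grafo U root [adjs] tree vis = dfsA Grafo U root adjs tree vis := by
  rw [runB_sim, runB]

-- ===== VERDICT (by name: the statement is the Claim_ definition above) =====
theorem convertToDFSTree_spec : Claim_equal_convertToDFSTree := by
  intro Grafo v _ _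
  unfold Spec_convertToDFSTree convertToDFSTree convertToDFSTree_alt
  simp only [List.foldl_cons]
  have hv : ¬ ((v : String) ∈ (PySem.Set.empty : PySem.Set String)) := List.not_mem_nil
  rw [if_neg hv, runB_single]
  congr 1
  congr 1
  exact (List.foldl_ext _ _ _ (fun st k _ => by
    by_cases h : k ∈ st.2
    · simp [h]
    · simp only [if_neg h, runB_single])).symm
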